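-- pv_equiv track=rewrite | github.com/schmittydog/algo_expert | Medium/valid_ip_addresses.py | gen_strings
-- ===== SOURCE A (Python) =====
-- def gen_strings(str):
--     l = len(str)
--     for a in range(1, l-2):
--         if a > 3: break
--         for b in range(a+1, l-1):
--             if b - a > 3: break
--             for c in range(b+1, l):
--                 if c - b > 3: break
--                 if l - c > 3: continue
--                 yield f'{str[:a]}.{str[a:b]}.{str[b:c]}.{str[c:]}'
-- ===== SOURCE B (Python) =====
-- def gen_strings(str):
--     # Recursive backtracking: pick segment lengths 1..3 in increasing order,
--     # keeping at least one character per remaining part; yield joined parts.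
--     l = len(str)
--
--     def rec(start, parts_left, acc):
--         if parts_left == 1:
--             rest = str[start:]
--             if 1 <= len(rest) <= 3:
--                 yield '.'.join(acc + [rest])
--             return
--         for seg_len in (1, 2, 3):
--             end = start + seg_len
--             if end + (parts_left - 1) > l:
--                 break
--             yield from rec(end, parts_left - 1, acc + [str[start:end]])
--
--     yield from rec(0, 4, [])
-- ===== Notes on version B (the rewrite author's own statement) =====
-- stated objective: alternative
-- what changed: Replaced A's three hard-coded nested index loops (cut points a,b,c with break/continue guards) by a recursive backtracking generator rec(start, parts_left, acc) that picks each segment's length from (1,2,3) and joins the accumulated parts at the base case.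
import Mathlib
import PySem

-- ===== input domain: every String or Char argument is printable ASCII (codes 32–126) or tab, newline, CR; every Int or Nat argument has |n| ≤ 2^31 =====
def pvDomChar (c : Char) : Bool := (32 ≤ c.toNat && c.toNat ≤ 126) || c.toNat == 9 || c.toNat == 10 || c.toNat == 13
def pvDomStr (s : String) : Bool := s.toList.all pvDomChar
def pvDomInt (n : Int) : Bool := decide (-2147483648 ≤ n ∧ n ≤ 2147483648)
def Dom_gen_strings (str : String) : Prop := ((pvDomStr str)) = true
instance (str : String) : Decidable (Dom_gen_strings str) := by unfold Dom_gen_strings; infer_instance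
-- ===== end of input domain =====

-- B replaces A's three hard-coded nested index loops by a recursive backtracking
-- generator over segment lengths (objective: simpler/alternative decomposition).
-- Both are generators in Python; the ports return the list of yielded strings.

-- ===== PORT A =====
-- the f-string  f'{str[:a]}.{str[a:b]}.{str[b:c]}.{str[c:]}'
def pvEmitA (s : List Char) (a b c : Int) : String :=
  String.ofList (PySem.List.slice s none (some a) ++ ['.'] ++
    PySem.List.slice s (some a) (some b) ++ ['.'] ++
    PySem.List.slice s (some b) (some c) ++ ['.'] ++
    PySem.List.slice s (some c) none)

-- innermost 'for c in range(b+1, l)' with break / continue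
def pvLoopC (s : List Char) (l a b : Int) : List Int → List String
  | [] => []
  | c :: rest =>
    if c - b > 3 then []
    else (if l - c > 3 then [] else [pvEmitA s a b c]) ++ pvLoopC s l a b rest

-- 'for b in range(a+1, l-1)' with break
def pvLoopB (s : List Char) (l a : Int) : List Int → List String
  | [] => []
  | b :: rest =>
    if b - a > 3 then []
    else pvLoopC s l a b (PySem.List.pyRange (b + 1) l 1) ++ pvLoopB s l a rest

-- 'for a in range(1, l-2)' with break
def pvLoopA (s : List Char) (l : Int) : List Int → List String
  | [] => []
  | a :: rest =>
    if a > 3 then []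
    else pvLoopB s l a (PySem.List.pyRange (a + 1) (l - 1) 1) ++ pvLoopA s l rest

def gen_strings (str : String) : List String :=
  let s := str.toList
  let l := PySem.Str.len str
  pvLoopA s l (PySem.List.pyRange 1 (l - 2) 1)

-- ===== PORT B =====
-- '.'.join(acc + [rest])
def pvJoinDots (parts : List (List Char)) : String :=
  String.ofList (PySem.Chars.join ['.'] parts)

-- 'for seg_len in (1, 2, 3): … break …' part of rec; f is the recursive call rec(·, parts_left-1, ·)
def pvSegLoop (f : Int → List (List Char) → List String) (s : List Char) (l plm1 start : Int)
    (acc : List (List Char)) : List Int → List String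
  | [] => []
  | sl :: rest =>
    let e := start + sl
    if e + plm1 > l then []
    else f e (acc ++ [PySem.List.slice s (some start) (some e)]) ++
         pvSegLoop f s l plm1 start acc rest

-- rec(start, parts_left, acc)
def pvRec (s : List Char) (l : Int) : Nat → Int → List (List Char) → List String
  | 0, _, _ => []          -- unreachable: B's rec is called only with parts_left ≥ 1
  | 1, start, acc =>
    let rest := PySem.List.slice s (some start) none
    if 1 ≤ rest.length ∧ rest.length ≤ 3 then [pvJoinDots (acc ++ [rest])] else []
  | (n + 2), start, acc => pvSegLoop (pvRec s l (n + 1)) s l ((n : Int) + 1) start acc [1, 2, 3]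

def gen_strings_alt (str : String) : List String :=
  pvRec str.toList (PySem.Str.len str) 4 0 []

-- ===== PRECONDITION & SPEC =====
def Spec_gen_strings (str : String) (out : List String) : Prop := out = gen_strings_alt str
instance (str : String) (out : List String) : Decidable (Spec_gen_strings str out) := by
  unfold Spec_gen_strings; infer_instance

-- ===== CLAIM (what is proved, stated in full; the proofs are below) =====
def Claim_equal_gen_strings : Prop := ∀ (str : String), Dom_gen_strings str → Spec_gen_strings str (gen_strings str)

-- ===== LEMMAS AND PROOFS =====

-- the f-string is the '.'-join of the four slices
lemma pvEmit_join (s : List Char) (a b c : Int) :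
    pvEmitA s a b c = pvJoinDots [PySem.List.slice s none (some a),
      PySem.List.slice s (some a) (some b), PySem.List.slice s (some b) (some c),
      PySem.List.slice s (some c) none] := by
  simp [pvEmitA, pvJoinDots, PySem.Chars.join, List.intercalate, List.intersperse]

-- one-step unfoldings of pvRec and of the seg_len loop over (1, 2, 3)
lemma pvRec_two (s : List Char) (l start : Int) (acc : List (List Char)) :
    pvRec s l 2 start acc = pvSegLoop (pvRec s l 1) s l 1 start acc [1, 2, 3] := by
  norm_num [pvRec]

lemma pvRec_three (s : List Char) (l start : Int) (acc : List (List Char)) :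
    pvRec s l 3 start acc = pvSegLoop (pvRec s l 2) s l 2 start acc [1, 2, 3] := by
  norm_num [pvRec]

lemma pvRec_four (s : List Char) (l start : Int) (acc : List (List Char)) :
    pvRec s l 4 start acc = pvSegLoop (pvRec s l 3) s l 3 start acc [1, 2, 3] := by
  norm_num [pvRec]

lemma pvSegLoop_123 (f : Int → List (List Char) → List String) (s : List Char)
    (l plm1 start : Int) (acc : List (List Char)) :
    pvSegLoop f s l plm1 start acc [1, 2, 3] =
      if start + 1 + plm1 > l then [] else
        f (start + 1) (acc ++ [PySem.List.slice s (some start) (some (start + 1))]) ++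
        (if start + 2 + plm1 > l then [] else
          f (start + 2) (acc ++ [PySem.List.slice s (some start) (some (start + 2))]) ++
          (if start + 3 + plm1 > l then [] else
            f (start + 3) (acc ++ [PySem.List.slice s (some start) (some (start + 3))]) ++ [])) := by
  simp [pvSegLoop]

-- break lemmas: once the break guard fires, the rest of the range contributes nothing
lemma pvLoopC_stop (s : List Char) (l a b c0 : Int) (h : c0 - b > 3) :
    pvLoopC s l a b (PySem.List.pyRange c0 l 1) = [] := by
  by_cases hlt : c0 < l
  · rw [PySem.List.pyRange_one_cons hlt]; simp [pvLoopC, h]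
  · rw [PySem.List.pyRange_one_eq_nil (by omega)]; rfl

lemma pvLoopB_stop (s : List Char) (l a b0 : Int) (h : b0 - a > 3) :
    pvLoopB s l a (PySem.List.pyRange b0 (l - 1) 1) = [] := by
  by_cases hlt : b0 < l - 1
  · rw [PySem.List.pyRange_one_cons hlt]; simp [pvLoopB, h]
  · rw [PySem.List.pyRange_one_eq_nil (by omega)]; rfl

lemma pvLoopA_stop (s : List Char) (l a0 : Int) (h : a0 > 3) :
    pvLoopA s l (PySem.List.pyRange a0 (l - 2) 1) = [] := by
  by_cases hlt : a0 < l - 2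
  · rw [PySem.List.pyRange_one_cons hlt]; simp [pvLoopA, h]
  · rw [PySem.List.pyRange_one_eq_nil (by omega)]; rfl

-- leaf: B's rec with parts_left = 1 in A's guard form
lemma pvLeaf (s : List Char) (l c : Int) (acc : List (List Char))
    (hl : l = (s.length : Int)) (h0 : 0 ≤ c) (hcl : c < l) :
    pvRec s l 1 c acc
      = if l - c > 3 then []
        else [pvJoinDots (acc ++ [PySem.List.slice s (some c) none])] := by
  have hlen : ((PySem.List.slice s (some c) none).length : Int) = l - c := by
    rw [PySem.List.slice_from _ h0]; simp; omega
  simp only [pvRec]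
  by_cases h2 : l - c > 3
  · rw [if_pos h2, if_neg (by omega)]
  · rw [if_neg h2, if_pos (by omega)]

-- level 3: A's c-loop = B's rec with parts_left = 2
lemma pvLemC (s : List Char) (l a b : Int) (hl : l = (s.length : Int)) (h0 : 0 ≤ b) :
    pvLoopC s l a b (PySem.List.pyRange (b + 1) l 1)
      = pvRec s l 2 b [PySem.List.slice s none (some a), PySem.List.slice s (some a) (some b)] := by
  rw [pvRec_two, pvSegLoop_123]
  by_cases h1 : b + 1 < l
  · rw [PySem.List.pyRange_one_cons h1, if_neg (show ¬ b + 1 + 1 > l by omega),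
        pvLeaf s l (b + 1) _ hl (by omega) (by omega)]
    simp only [pvLoopC, if_neg (show ¬ b + 1 - b > 3 by omega)]
    rw [show b + 1 + 1 = b + 2 by ring]
    by_cases h2 : b + 2 < l
    · rw [PySem.List.pyRange_one_cons h2, if_neg (show ¬ b + 2 + 1 > l by omega),
          pvLeaf s l (b + 2) _ hl (by omega) (by omega)]
      simp only [pvLoopC, if_neg (show ¬ b + 2 - b > 3 by omega)]
      rw [show b + 2 + 1 = b + 3 by ring]
      by_cases h3 : b + 3 < l
      · rw [PySem.List.pyRange_one_cons h3, if_neg (show ¬ b + 3 + 1 > l by omega),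
            pvLeaf s l (b + 3) _ hl (by omega) (by omega)]
        simp only [pvLoopC, if_neg (show ¬ b + 3 - b > 3 by omega)]
        rw [show b + 3 + 1 = b + 4 by ring, pvLoopC_stop s l a b (b + 4) (by omega)]
        simp [pvEmit_join]
      · rw [PySem.List.pyRange_one_eq_nil (by omega), if_pos (show b + 3 + 1 > l by omega)]
        simp [pvLoopC, pvEmit_join]
    · rw [PySem.List.pyRange_one_eq_nil (by omega), if_pos (show b + 2 + 1 > l by omega)]
      simp [pvLoopC, pvEmit_join]
  · rw [PySem.List.pyRange_one_eq_nil (by omega), if_pos (show b + 1 + 1 > l by omega)]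
    rfl

-- level 2: A's b-loop = B's rec with parts_left = 3
lemma pvLemB (s : List Char) (l a : Int) (hl : l = (s.length : Int)) (h0 : 0 ≤ a) :
    pvLoopB s l a (PySem.List.pyRange (a + 1) (l - 1) 1)
      = pvRec s l 3 a [PySem.List.slice s none (some a)] := by
  rw [pvRec_three, pvSegLoop_123]
  by_cases h1 : a + 1 < l - 1
  · rw [PySem.List.pyRange_one_cons h1, if_neg (show ¬ a + 1 + 2 > l by omega)]
    simp only [pvLoopB, if_neg (show ¬ a + 1 - a > 3 by omega)]
    rw [pvLemC s l a (a + 1) hl (by omega), show a + 1 + 1 = a + 2 by ring]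
    by_cases h2 : a + 2 < l - 1
    · rw [PySem.List.pyRange_one_cons h2, if_neg (show ¬ a + 2 + 2 > l by omega)]
      simp only [pvLoopB, if_neg (show ¬ a + 2 - a > 3 by omega)]
      rw [pvLemC s l a (a + 2) hl (by omega), show a + 2 + 1 = a + 3 by ring]
      by_cases h3 : a + 3 < l - 1
      · rw [PySem.List.pyRange_one_cons h3, if_neg (show ¬ a + 3 + 2 > l by omega)]
        simp only [pvLoopB, if_neg (show ¬ a + 3 - a > 3 by omega)]
        rw [pvLemC s l a (a + 3) hl (by omega), show a + 3 + 1 = a + 4 by ring,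
            pvLoopB_stop s l a (a + 4) (by omega)]
        simp
      · rw [PySem.List.pyRange_one_eq_nil (by omega), if_pos (show a + 3 + 2 > l by omega)]
        simp [pvLoopB]
    · rw [PySem.List.pyRange_one_eq_nil (by omega), if_pos (show a + 2 + 2 > l by omega)]
      simp [pvLoopB]
  · rw [PySem.List.pyRange_one_eq_nil (by omega), if_pos (show a + 1 + 2 > l by omega)]
    rfl

-- level 1: A's a-loop = B's rec with parts_left = 4
lemma pvMain (s : List Char) (l : Int) (hl : l = (s.length : Int)) :
    pvLoopA s l (PySem.List.pyRange 1 (l - 2) 1) = pvRec s l 4 0 [] := by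
  rw [pvRec_four, pvSegLoop_123]
  by_cases h1 : 1 < l - 2
  · rw [PySem.List.pyRange_one_cons h1, if_neg (show ¬ (0 : Int) + 1 + 3 > l by omega)]
    simp only [pvLoopA, if_neg (show ¬ (1 : Int) > 3 by norm_num)]
    rw [pvLemB s l 1 hl (by omega), show (1 : Int) + 1 = 2 by norm_num]
    by_cases h2 : 2 < l - 2
    · rw [PySem.List.pyRange_one_cons h2, if_neg (show ¬ (0 : Int) + 2 + 3 > l by omega)]
      simp only [pvLoopA, if_neg (show ¬ (2 : Int) > 3 by norm_num)]
      rw [pvLemB s l 2 hl (by omega), show (2 : Int) + 1 = 3 by norm_num]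
      by_cases h3 : 3 < l - 2
      · rw [PySem.List.pyRange_one_cons h3, if_neg (show ¬ (0 : Int) + 3 + 3 > l by omega)]
        simp only [pvLoopA, if_neg (show ¬ (3 : Int) > 3 by norm_num)]
        rw [pvLemB s l 3 hl (by omega), show (3 : Int) + 1 = 4 by norm_num,
            pvLoopA_stop s l 4 (by norm_num)]
        simp [PySem.List.slice_zero_start]
      · rw [PySem.List.pyRange_one_eq_nil (by omega), if_pos (show (0 : Int) + 3 + 3 > l by omega)]
        simp [pvLoopA, PySem.List.slice_zero_start]
    · rw [PySem.List.pyRange_one_eq_nil (by omega), if_pos (show (0 : Int) + 2 + 3 > l by omega)]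
      simp [pvLoopA, PySem.List.slice_zero_start]
  · rw [PySem.List.pyRange_one_eq_nil (by omega), if_pos (show (0 : Int) + 1 + 3 > l by omega)]
    rfl

-- ===== VERDICT (by name: the statement is the Claim_ definition above) =====
theorem gen_strings_spec : Claim_equal_gen_strings := by
  intro str _
  unfold Spec_gen_strings gen_strings gen_strings_alt
  exact pvMain str.toList (PySem.Str.len str) (by simp [pysem])
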